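-- pv_equiv track=rewrite | github.com/azraeltruthsay/gaia | gaia-common/gaia_common/utils/aaak_dialect.py | _detect_flags
-- ===== SOURCE A (Python) =====
-- from typing import Dict, List, Optional
--
-- _FLAG_SIGNALS = {
--     "decided": "DECISION",
--     "chose": "DECISION",
--     "switched": "DECISION",
--     "migrated": "DECISION",
--     "replaced": "DECISION",
--     "instead of": "DECISION",
--     "because": "DECISION",
--     "founded": "ORIGIN",
--     "created": "ORIGIN",
--     "started": "ORIGIN",
--     "launched": "ORIGIN",
--     "first time": "ORIGIN",
--     "introduced": "ORIGIN",
--     "core": "CORE",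
--     "fundamental": "CORE",
--     "essential": "CORE",
--     "principle": "CORE",
--     "identity": "CORE",
--     "sovereign": "CORE",
--     "constitution": "CORE",
--     "turning point": "PIVOT",
--     "changed everything": "PIVOT",
--     "realized": "PIVOT",
--     "breakthrough": "PIVOT",
--     "api": "TECHNICAL",
--     "database": "TECHNICAL",
--     "architecture": "TECHNICAL",
--     "deploy": "TECHNICAL",
--     "infrastructure": "TECHNICAL",
--     "algorithm": "TECHNICAL",
--     "framework": "TECHNICAL",
--     "server": "TECHNICAL",
--     "config": "TECHNICAL",
--     "model": "TECHNICAL",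
--     "inference": "TECHNICAL",
--     "pipeline": "TECHNICAL",
--     "endpoint": "TECHNICAL",
--     "container": "TECHNICAL",
--     "gpu": "TECHNICAL",
--     "vram": "TECHNICAL",
--     "qlora": "TECHNICAL",
--     "adapter": "TECHNICAL",
-- }
--
-- def _detect_flags(text: str) -> List[str]:
--     """Detect importance flags from plain text."""
--     text_lower = text.lower()
--     detected = []
--     seen = set()
--     for keyword, flag in _FLAG_SIGNALS.items():
--         if keyword in text_lower and flag not in seen:
--             detected.append(flag)
--             seen.add(flag)
--     return detected[:3]
-- ===== SOURCE B (Python) =====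
-- _FLAG_KEYWORDS = [
--     ("DECISION", ["decided", "chose", "switched", "migrated", "replaced", "instead of", "because"]),
--     ("ORIGIN", ["founded", "created", "started", "launched", "first time", "introduced"]),
--     ("CORE", ["core", "fundamental", "essential", "principle", "identity", "sovereign", "constitution"]),
--     ("PIVOT", ["turning point", "changed everything", "realized", "breakthrough"]),
--     ("TECHNICAL", ["api", "database", "architecture", "deploy", "infrastructure", "algorithm",
--                    "framework", "server", "config", "model", "inference", "pipeline", "endpoint",
--                    "container", "gpu", "vram", "qlora", "adapter"]),
-- ]
--
--
-- def _detect_flags(text):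
--     """Detect importance flags from plain text."""
--     tl = text.lower()
--     return [flag for flag, kws in _FLAG_KEYWORDS if any(k in tl for k in kws)][:3]
-- ===== Notes on version B (the rewrite author's own statement) =====
-- stated objective: simpler
-- what changed: Replaces the flat keyword-to-flag dict scan with a dedup set of emitted flags by a flag-to-keywords grouped table: one comprehension over the five flags in fixed order, emitting a flag if any of its keywords occurs, then capped to 3; the dedup-set bookkeeping disappears.
import Mathlib
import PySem

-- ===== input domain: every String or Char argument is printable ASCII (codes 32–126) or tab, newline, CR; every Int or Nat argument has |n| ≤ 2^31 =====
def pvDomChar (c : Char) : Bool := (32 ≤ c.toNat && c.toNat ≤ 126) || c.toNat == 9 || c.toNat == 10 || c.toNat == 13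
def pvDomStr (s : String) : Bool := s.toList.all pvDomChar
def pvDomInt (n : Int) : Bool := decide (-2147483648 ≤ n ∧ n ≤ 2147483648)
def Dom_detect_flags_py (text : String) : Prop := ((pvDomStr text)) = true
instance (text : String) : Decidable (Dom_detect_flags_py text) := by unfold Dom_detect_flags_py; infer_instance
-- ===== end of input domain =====

-- B replaces A's flat keyword->flag scan with a dedup `seen` set by a grouped flag->keywords
-- table traversed once per flag in the same fixed order (objective: simpler); same return value.


-- ===== PORT A =====
-- _FLAG_SIGNALS dict as its items list, in insertion order
def pvFlagSignals : List (String × String) :=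
  [("decided", "DECISION"), ("chose", "DECISION"), ("switched", "DECISION"),
   ("migrated", "DECISION"), ("replaced", "DECISION"), ("instead of", "DECISION"),
   ("because", "DECISION"),
   ("founded", "ORIGIN"), ("created", "ORIGIN"), ("started", "ORIGIN"),
   ("launched", "ORIGIN"), ("first time", "ORIGIN"), ("introduced", "ORIGIN"),
   ("core", "CORE"), ("fundamental", "CORE"), ("essential", "CORE"),
   ("principle", "CORE"), ("identity", "CORE"), ("sovereign", "CORE"),
   ("constitution", "CORE"),
   ("turning point", "PIVOT"), ("changed everything", "PIVOT"), ("realized", "PIVOT"),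
   ("breakthrough", "PIVOT"),
   ("api", "TECHNICAL"), ("database", "TECHNICAL"), ("architecture", "TECHNICAL"),
   ("deploy", "TECHNICAL"), ("infrastructure", "TECHNICAL"), ("algorithm", "TECHNICAL"),
   ("framework", "TECHNICAL"), ("server", "TECHNICAL"), ("config", "TECHNICAL"),
   ("model", "TECHNICAL"), ("inference", "TECHNICAL"), ("pipeline", "TECHNICAL"),
   ("endpoint", "TECHNICAL"), ("container", "TECHNICAL"), ("gpu", "TECHNICAL"),
   ("vram", "TECHNICAL"), ("qlora", "TECHNICAL"), ("adapter", "TECHNICAL")]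

-- the body of A's for-loop: state = (detected, seen)
def pvStepA (tl : String) (st : List String × PySem.Set String) (p : String × String) :
    List String × PySem.Set String :=
  if PySem.Str.isIn p.1 tl && !(st.2.contains p.2) then (st.1 ++ [p.2], st.2.add p.2) else st

def detect_flags_py (text : String) : List String :=
  let text_lower := PySem.Str.lower text
  let st := pvFlagSignals.foldl (pvStepA text_lower) ([], PySem.Set.empty)
  PySem.List.slice st.1 none (some 3)

-- ===== PORT B =====
def pvFlagKeywords : List (String × List String) :=
  [("DECISION", ["decided", "chose", "switched", "migrated", "replaced", "instead of", "because"]),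
   ("ORIGIN", ["founded", "created", "started", "launched", "first time", "introduced"]),
   ("CORE", ["core", "fundamental", "essential", "principle", "identity", "sovereign", "constitution"]),
   ("PIVOT", ["turning point", "changed everything", "realized", "breakthrough"]),
   ("TECHNICAL", ["api", "database", "architecture", "deploy", "infrastructure", "algorithm",
                  "framework", "server", "config", "model", "inference", "pipeline", "endpoint",
                  "container", "gpu", "vram", "qlora", "adapter"])]

def detect_flags_py_alt (text : String) : List String :=
  let tl := PySem.Str.lower text
  PySem.List.slice
    ((pvFlagKeywords.filter (fun g => g.2.any (fun k => PySem.Str.isIn k tl))).map (fun g => g.1))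
    none (some 3)

-- ===== PRECONDITION & SPEC =====
def Spec_detect_flags_py (text : String) (out : List String) : Prop := out = detect_flags_py_alt text
instance (text : String) (out : List String) : Decidable (Spec_detect_flags_py text out) := by unfold Spec_detect_flags_py; infer_instance

-- ===== CLAIM (what is proved, stated in full; the proofs are below) =====
def Claim_equal_detect_flags_py : Prop := ∀ (text : String), Dom_detect_flags_py text → Spec_detect_flags_py text (detect_flags_py text)

-- ===== LEMMAS AND PROOFS =====

-- once a flag is in `seen`, the loop skips every remaining keyword of that flag
theorem pvFold_skip (tl : String) (ks : List String) (f : String) (acc : List String)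
    (seen : PySem.Set String) (hf : f ∈ seen) :
    (ks.map (fun k => (k, f))).foldl (pvStepA tl) (acc, seen) = (acc, seen) := by
  induction ks with
  | nil => rfl
  | cons k ks ih =>
      simp only [List.map_cons, List.foldl_cons, pvStepA]
      have hc : (seen.contains f) = true := (PySem.Set.contains_iff seen f).mpr hf
      rw [if_neg (by rw [hc]; simp), ih]

-- one group of keywords for a fresh flag f: appends f iff any keyword occurs
theorem pvFold_group (tl : String) (ks : List String) (f : String) (acc : List String)
    (seen : PySem.Set String) (hf : f ∉ seen) :
    (ks.map (fun k => (k, f))).foldl (pvStepA tl) (acc, seen)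
      = if ks.any (fun k => PySem.Str.isIn k tl) then (acc ++ [f], seen.add f) else (acc, seen) := by
  induction ks with
  | nil => simp
  | cons k ks ih =>
      simp only [List.map_cons, List.foldl_cons, List.any_cons, pvStepA]
      by_cases hk : PySem.Str.isIn k tl = true
      · have hc : (seen.contains f) = false := by
          by_contra h
          exact hf ((PySem.Set.contains_iff seen f).mp (by simpa using h))
        have hmem : f ∈ seen.add f := (PySem.Set.mem_add seen f f).mpr (Or.inr rfl)
        rw [if_pos (by rw [hk, hc]; rfl),
            pvFold_skip tl ks f (acc ++ [f]) (seen.add f) hmem,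
            if_pos (by rw [hk]; rfl)]
      · have hk' : PySem.Str.isIn k tl = false := by
          cases h : PySem.Str.isIn k tl
          · rfl
          · exact absurd h hk
        rw [if_neg (by rw [hk']; simp), ih]
        by_cases ha : (ks.any fun k => PySem.Str.isIn k tl) = true
        · rw [if_pos ha, if_pos (by rw [hk', ha]; rfl)]
        · have ha' : (ks.any fun k => PySem.Str.isIn k tl) = false := by
            cases h : ks.any fun k => PySem.Str.isIn k tl
            · rfl
            · exact absurd h ha
          rw [if_neg (by rw [ha']; simp), if_neg (by rw [hk', ha']; simp)]

-- the whole loop over contiguous groups, with all group flags distinct and unseen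
theorem pvFold_groups (tl : String) (gs : List (String × List String)) (acc : List String)
    (seen : PySem.Set String) (hdisj : ∀ g ∈ gs, g.1 ∉ seen)
    (hnodup : (gs.map Prod.fst).Nodup) :
    ((gs.flatMap (fun g => g.2.map (fun k => (k, g.1)))).foldl (pvStepA tl) (acc, seen)).1
      = acc ++ (gs.filter (fun g => g.2.any (fun k => PySem.Str.isIn k tl))).map Prod.fst := by
  induction gs generalizing acc seen with
  | nil => simp
  | cons g gs ih =>
      simp only [List.flatMap_cons, List.foldl_append]
      rw [pvFold_group tl g.2 g.1 acc seen (hdisj g (List.mem_cons_self))]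
      simp only [List.map_cons, List.nodup_cons] at hnodup
      by_cases hg : g.2.any (fun k => PySem.Str.isIn k tl) = true
      · have hdisj' : ∀ g' ∈ gs, g'.1 ∉ seen.add g.1 := by
          intro g' hg'
          rw [PySem.Set.mem_add]
          rintro (h | h)
          · exact hdisj g' (List.mem_cons_of_mem _ hg') h
          · exact hnodup.1 (h ▸ List.mem_map_of_mem hg')
        rw [if_pos hg, ih (acc ++ [g.1]) (seen.add g.1) hdisj' hnodup.2,
            List.filter_cons, if_pos hg]
        simp
      · have hg' : (g.2.any fun k => PySem.Str.isIn k tl) = false := by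
          cases h : g.2.any fun k => PySem.Str.isIn k tl
          · rfl
          · exact absurd h hg
        rw [if_neg (by rw [hg']; simp),
            ih acc seen (fun g' h => hdisj g' (List.mem_cons_of_mem _ h)) hnodup.2,
            List.filter_cons, if_neg (by rw [hg']; simp)]

-- A's flat items list is exactly B's grouped table flattened
theorem pvFlat : pvFlagSignals
    = pvFlagKeywords.flatMap (fun g => g.2.map (fun k => (k, g.1))) := by decide

-- ===== VERDICT (by name: the statement is the Claim_ definition above) =====
theorem detect_flags_py_spec : Claim_equal_detect_flags_py := by
  intro text _
  unfold Spec_detect_flags_py detect_flags_py detect_flags_py_alt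
  have h := pvFold_groups (PySem.Str.lower text) pvFlagKeywords [] PySem.Set.empty
      (by intro g _ hm; exact (List.not_mem_nil) hm) (by decide)
  simp only [List.nil_append] at h
  simp only [pvFlat, h]
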